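-- pv_equiv track=rewrite | github.com/rdadkins01/AOC-2025 | 02/p2.py | get_values_to_check
-- ===== SOURCE A (Python) =====
-- import math
--
-- def get_values_to_check(value):
--     current_num = ""
--     values_to_check = []
--     for num in value:
--
--         # Dont need to check values longer than half the length of original value
--         if len(current_num) <= int(math.floor(len(value)/2)):
--
--             # Also don't need to add values that can't completely repeat due to length
--             if current_num != "":
--                 if len(value) % len(current_num) == 0:
--                     values_to_check.append(current_num)
--             current_num += num
--     return values_to_check
-- ===== SOURCE B (Python) =====
-- def get_values_to_check(value):
--     n = len(value)
--     return [value[:k] for k in range(1, n // 2 + 1) if n % k == 0]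
-- ===== Notes on version B (the rewrite author's own statement) =====
-- stated objective: faster
-- what changed: Replaces the character-by-character loop that grows a prefix string (quadratic string concatenation) with a direct comprehension emitting value[:k] for each k up to len(value)//2 that divides len(value).
import Mathlib
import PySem

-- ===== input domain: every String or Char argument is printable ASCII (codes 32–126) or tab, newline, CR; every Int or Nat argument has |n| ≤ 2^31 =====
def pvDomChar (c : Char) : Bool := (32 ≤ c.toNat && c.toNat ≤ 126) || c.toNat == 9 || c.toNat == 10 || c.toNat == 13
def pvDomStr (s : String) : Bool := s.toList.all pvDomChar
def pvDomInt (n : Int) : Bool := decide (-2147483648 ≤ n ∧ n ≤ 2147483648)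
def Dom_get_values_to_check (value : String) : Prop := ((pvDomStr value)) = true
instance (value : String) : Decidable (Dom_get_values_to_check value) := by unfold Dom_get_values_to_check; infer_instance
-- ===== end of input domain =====

-- B replaces A's per-character loop growing a prefix string with a direct comprehension
-- over the candidate lengths k = 1 .. len(value)//2 that divide len(value) (objective: faster).

-- ===== PORT A =====
-- one loop step of A: the state is (current_num, values_to_check)
def pvStepA (value : String) (st : List Char × List String) (num : Char) :
    List Char × List String :=
  if (st.1.length : Int) ≤ PySem.Int.floordiv (PySem.Str.len value) 2 then
    let vals :=
      if st.1 ≠ [] then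
        if PySem.Int.mod (PySem.Str.len value) (st.1.length : Int) = 0 then
          st.2 ++ [String.ofList st.1]
        else st.2
      else st.2
    (st.1 ++ [num], vals)
  else st

def get_values_to_check (value : String) : List String :=
  (value.toList.foldl (pvStepA value) (([] : List Char), ([] : List String))).2

-- ===== PORT B =====
def get_values_to_check_alt (value : String) : List String :=
  ((PySem.List.pyRange 1 (PySem.Int.floordiv (PySem.Str.len value) 2 + 1) 1).filter
      (fun k => PySem.Int.mod (PySem.Str.len value) k == 0)).map
    (fun k => PySem.Str.slice value none (some k))

-- ===== PRECONDITION & SPEC =====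
def Spec_get_values_to_check (value : String) (out : List String) : Prop := out = get_values_to_check_alt value
instance (value : String) (out : List String) : Decidable (Spec_get_values_to_check value out) := by unfold Spec_get_values_to_check; infer_instance

-- ===== CLAIM (what is proved, stated in full; the proofs are below) =====
def Claim_equal_get_values_to_check : Prop := ∀ (value : String), Dom_get_values_to_check value → Spec_get_values_to_check value (get_values_to_check value)

-- ===== LEMMAS AND PROOFS =====

theorem pv_len_eq (value : String) : PySem.Str.len value = (value.toList.length : Int) := by
  simp [PySem.Str.len_eq]

theorem pv_floordiv_two (n : Nat) :
    PySem.Int.floordiv (n : Int) 2 = ((n / 2 : Nat) : Int) := by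
  show Int.fdiv _ _ = _
  rw [show ((2:Int)) = ((2:Nat):Int) from rfl, Int.ofNat_fdiv]

-- once the current prefix is longer than the bound, the loop does nothing
theorem pv_fold_stuck (value : String) (rest : List Char) (c : List Char) (acc : List String)
    (hc : ¬ ((c.length : Int) ≤ PySem.Int.floordiv (PySem.Str.len value) 2)) :
    rest.foldl (pvStepA value) (c, acc) = (c, acc) := by
  induction rest with
  | nil => rfl
  | cons x xs ih => simp only [List.foldl_cons, pvStepA, if_neg hc]; exact ih

-- the accumulator threads through: new emissions are appended after acc
theorem pv_fold_acc (value : String) (rest : List Char) :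
    ∀ (c : List Char) (acc : List String),
      (rest.foldl (pvStepA value) (c, acc)).2 =
        acc ++ (rest.foldl (pvStepA value) (c, [])).2 := by
  induction rest with
  | nil => intro c acc; simp
  | cons x xs ih =>
    intro c acc
    simp only [List.foldl_cons, pvStepA]
    split_ifs with h1 h2 h3
    · simp only [List.nil_append]
      rw [ih (c ++ [x]) (acc ++ [String.ofList c]), ih (c ++ [x]) ([String.ofList c])]
      simp
    · exact ih _ _
    · exact ih _ _
    · exact ih _ _

-- the emissions of A starting from prefix length j, as a range of prefix lengths
def pvS (l : List Char) (j : Nat) : List String :=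
  ((List.range' j (l.length / 2 + 1 - j)).filter
      (fun (k : Nat) => decide (1 ≤ k) && decide (PySem.Int.mod (l.length : Int) ((k : Nat) : Int) = 0))).map
    (fun (k : Nat) => String.ofList (l.take k))

theorem pvS_high (l : List Char) (j : Nat) (hj : l.length / 2 < j) : pvS l j = [] := by
  simp [pvS, show l.length / 2 + 1 - j = 0 by omega]

theorem pvS_cons (l : List Char) (j : Nat) (hcase : j ≤ l.length / 2) :
    pvS l j =
      (if j ≠ 0 then
        (if PySem.Int.mod (l.length : Int) (j : Int) = 0 then [String.ofList (l.take j)] else [])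
      else []) ++ pvS l (j + 1) := by
  unfold pvS
  rw [show l.length / 2 + 1 - j = (l.length / 2 + 1 - (j + 1)) + 1 by omega,
    List.range'_succ, List.filter_cons]
  by_cases h0 : j = 0
  · subst h0; simp
  · by_cases hm : PySem.Int.mod (l.length : Int) (j : Int) = 0
    · simp [h0, hm, Nat.one_le_iff_ne_zero]
    · rw [PySem.Int.mod_eq_zero_iff_dvd] at hm
      simp [h0, hm, Nat.one_le_iff_ne_zero]

theorem pv_main (value : String) : ∀ (d j : Nat), j ≤ value.toList.length →
    value.toList.length - j = d →
    ((value.toList.drop j).foldl (pvStepA value) (value.toList.take j, [])).2 =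
      pvS value.toList j := by
  intro d
  induction d with
  | zero =>
    intro j hj hd
    have hjn : j = value.toList.length := by omega
    subst hjn
    simp only [List.drop_length, List.foldl_nil]
    rcases Nat.eq_zero_or_pos value.toList.length with h0 | hpos
    · simp [pvS, h0]
    · rw [pvS_high _ _ (by omega)]
  | succ d ih =>
    intro j hj hd
    have hjlt : j < value.toList.length := by omega
    have hfd : PySem.Int.floordiv (PySem.Str.len value) 2 =
        ((value.toList.length / 2 : Nat) : Int) := by
      rw [pv_len_eq, pv_floordiv_two]
    have hdrop : value.toList.drop j = value.toList[j] :: value.toList.drop (j + 1) :=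
      List.drop_eq_getElem_cons hjlt
    have hlen_take : (value.toList.take j).length = j := by
      rw [List.length_take]; exact Nat.min_eq_left hj
    have hstep : value.toList.take j ++ [value.toList[j]] = value.toList.take (j + 1) := by
      rw [List.take_add_one]
      simp [List.getElem?_eq_getElem hjlt]
    rw [hdrop]
    simp only [List.foldl_cons, pvStepA, hfd, hlen_take]
    by_cases hcase : j ≤ value.toList.length / 2
    · rw [if_pos (by exact_mod_cast hcase)]
      rw [pv_fold_acc, hstep, ih (j + 1) (by omega) (by omega),
        pvS_cons value.toList j hcase]
      congr 1
      by_cases h0 : j = 0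
      · subst h0; simp
      · have hne : value.toList.take j ≠ [] := by
          intro h; apply h0
          have := congrArg List.length h
          rw [hlen_take] at this; simpa using this
        rw [if_pos hne, if_pos h0]
        by_cases hm : PySem.Int.mod (PySem.Str.len value) (j : Int) = 0
        · rw [if_pos hm, if_pos (by rwa [pv_len_eq] at hm)]
          simp
        · rw [if_neg hm, if_neg (by rwa [pv_len_eq] at hm)]
    · rw [if_neg (by exact_mod_cast hcase)]
      rw [pv_fold_stuck value _ _ _ (by rw [hfd, hlen_take]; exact_mod_cast hcase)]
      rw [pvS_high _ _ (by omega)]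

theorem pv_slice_take (value : String) (k : Nat) :
    PySem.Str.slice value none (some (k : Int)) = String.ofList (value.toList.take k) := by
  apply String.toList_inj.mp
  simp [PySem.Str.toList_slice, PySem.List.slice_to_natCast, String.toList_ofList]

theorem pv_pred_eq (value : String) (i : Nat) :
    ((fun (k : Nat) => decide (1 ≤ k) && decide (PySem.Int.mod (value.toList.length : Int) ((k : Nat) : Int) = 0)) ∘ (fun x => 1 + x)) i =
    ((fun k => PySem.Int.mod (value.toList.length : Int) k == 0) ∘ (fun (x : Nat) => 1 + (x : Int))) i := by
  simp only [Function.comp]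
  rw [show (((1 + i : Nat) : Int)) = 1 + (i : Int) by push_cast; ring]
  simp only [Nat.one_le_iff_ne_zero]
  rw [Bool.eq_iff_iff]
  simp

theorem pvS_zero_eq_alt (value : String) : pvS value.toList 0 = get_values_to_check_alt value := by
  unfold pvS get_values_to_check_alt
  rw [pv_len_eq, pv_floordiv_two, PySem.List.pyRange_one]
  rw [show (((value.toList.length / 2 : Nat) : Int) + 1 - 1).toNat = value.toList.length / 2 by omega]
  rw [show value.toList.length / 2 + 1 - 0 = (value.toList.length / 2) + 1 from rfl]
  rw [List.range'_succ, List.filter_cons_of_neg (by simp)]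
  rw [List.range'_eq_map_range, List.filter_map, List.map_map, List.filter_map, List.map_map]
  rw [List.filter_congr (fun i _ => pv_pred_eq value i)]
  apply List.map_congr_left
  intro i _
  show String.ofList (value.toList.take (1 + i)) = PySem.Str.slice value none (some (1 + (i : Int)))
  rw [show (1 + (i : Int)) = (((1 + i : Nat) : Int)) by push_cast; ring, pv_slice_take]

-- ===== VERDICT (by name: the statement is the Claim_ definition above) =====
theorem get_values_to_check_spec : Claim_equal_get_values_to_check := by
  intro value _
  unfold Spec_get_values_to_check get_values_to_check
  have h0 := pv_main value value.toList.length 0 (by omega) (by omega)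
  simpa [pvS_zero_eq_alt value] using h0
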